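-- pv_equiv track=rewrite | github.com/avwohl/uc386 | src/uc386/dos_emu.py | _strip_libc_function
-- ===== SOURCE A (Python) =====
-- def _strip_libc_function(libc_text: str, name: str) -> str:
--     """Remove the function body labeled `_name:` from libc.asm so the
--     user's definition wins. The body extends from `_name:` up to the
--     next top-level label.
--     """
--     lines = libc_text.splitlines()
--     out: list[str] = []
--     skip = False
--     target = f"_{name}:"
--     target_alias_pre = f"_{name} "  # tolerate weird formatting
--     for line in lines:
--         s = line.strip()
--         if not skip and (s == target or s.startswith(target_alias_pre)):
--             skip = True
--             continue
--         if skip: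
--             # Stop skipping when we hit the next top-level label.
--             if s.startswith("_") and ":" in s and not s.startswith("."):
--                 skip = False
--         if not skip:
--             out.append(line)
--     return "\n".join(out)
-- ===== SOURCE B (Python) =====
-- def _strip_libc_function(libc_text: str, name: str) -> str:
--     """Locate/slice formulation: find each `_name:` trigger line, then the
--     next top-level label; drop the block in between, keep the label line."""
--     lines = libc_text.splitlines()
--     target = "_" + name + ":"
--     pre = "_" + name + " "
--     out = []
--     i = 0
--     n = len(lines)
--     while i < n:
--         s = lines[i].strip()
--         if s != target and not s.startswith(pre):
--             out.append(lines[i])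
--             i += 1
--             continue
--         j = next((k for k in range(i + 1, n)
--                   if (t := lines[k].strip()).startswith("_")
--                   and ":" in t and not t.startswith(".")), n)
--         if j < n:
--             out.append(lines[j])
--         i = j + 1
--     return "\n".join(out)
-- ===== Notes on version B (the rewrite author's own statement) =====
-- stated objective: simpler
-- what changed: Replaces the running skip-flag state machine with a locate-and-slice decomposition: find the trigger line, search forward for the next top-level label, keep it and resume there.
import Mathlib
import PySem

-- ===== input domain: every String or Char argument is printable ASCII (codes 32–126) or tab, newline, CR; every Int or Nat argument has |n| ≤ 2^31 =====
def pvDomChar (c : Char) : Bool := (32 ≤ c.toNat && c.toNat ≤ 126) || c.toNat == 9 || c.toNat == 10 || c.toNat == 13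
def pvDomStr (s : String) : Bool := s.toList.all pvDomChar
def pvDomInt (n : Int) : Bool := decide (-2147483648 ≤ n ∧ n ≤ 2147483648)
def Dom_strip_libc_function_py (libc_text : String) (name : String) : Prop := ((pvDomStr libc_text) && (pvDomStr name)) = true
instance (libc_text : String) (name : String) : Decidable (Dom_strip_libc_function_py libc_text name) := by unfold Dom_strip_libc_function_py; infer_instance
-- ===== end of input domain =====

-- B replaces A's running skip-flag state machine by a locate-and-slice decomposition
-- (find trigger line, search forward for the next top-level label, keep it, resume there);
-- objective: simpler, same cost.

-- ===== PORT A =====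
-- A's for-loop over lines with the `skip` flag, as structural recursion on the lines
-- with the same `skip` state; lines are emitted in order instead of appended to `out`.
def stripA_loop (target pre : String) (skip : Bool) : List String → List String
  | [] => []
  | line :: rest =>
    let s := PySem.Str.strip line
    if !skip && (s == target || PySem.Str.startswith s pre) then
      stripA_loop target pre true rest
    else
      let skip' := if skip && (PySem.Str.startswith s "_" && PySem.Str.isIn ":" s && !PySem.Str.startswith s ".") then false else skip
      if !skip' then line :: stripA_loop target pre skip' rest
      else stripA_loop target pre skip' rest

def strip_libc_function_py (libc_text : String) (name : String) : String :=
  PySem.Str.join "\n" (stripA_loop ("_" ++ name ++ ":") ("_" ++ name ++ " ") false (PySem.Str.splitlines libc_text))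

-- ===== PORT B =====
-- Source B's top-level-label test on a stripped line
def isLabelB (t : String) : Bool :=
  PySem.Str.startswith t "_" && PySem.Str.isIn ":" t && !PySem.Str.startswith t "."

-- Source B's inner search `next(k for k in range(i+1, n) if <label>)`: the suffix of the
-- lines starting at the first top-level label ([] if there is none)
def skipToLabel : List String → List String
  | [] => []
  | l :: rest => if isLabelB (PySem.Str.strip l) then l :: rest else skipToLabel rest

theorem skipToLabel_length_le (L : List String) : (skipToLabel L).length ≤ L.length := by
  induction L with
  | nil => simp [skipToLabel]
  | cons l rest ih =>
    simp only [skipToLabel]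
    split
    · simp
    · exact Nat.le_trans ih (Nat.le_succ _)

-- Source B's while-loop over the index i, as recursion on the remaining lines:
-- keep non-trigger lines; on a trigger, jump to the next label, keep it, resume after it.
def stripB_loop (target pre : String) : List String → List String
  | [] => []
  | line :: rest =>
    let s := PySem.Str.strip line
    if s != target && !PySem.Str.startswith s pre then
      line :: stripB_loop target pre rest
    else
      match h : skipToLabel rest with
      | [] => []
      | lab :: rest' => lab :: stripB_loop target pre rest'
termination_by L => L.length
decreasing_by
  · simp
  · have hle := skipToLabel_length_le rest
    rw [h] at hle
    simp at hle ⊢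
    omega

def strip_libc_function_py_alt (libc_text : String) (name : String) : String :=
  PySem.Str.join "\n" (stripB_loop ("_" ++ name ++ ":") ("_" ++ name ++ " ") (PySem.Str.splitlines libc_text))

-- ===== PRECONDITION & SPEC =====
def Spec_strip_libc_function_py (libc_text : String) (name : String) (out : String) : Prop := out = strip_libc_function_py_alt libc_text name
instance (libc_text : String) (name : String) (out : String) : Decidable (Spec_strip_libc_function_py libc_text name out) := by unfold Spec_strip_libc_function_py; infer_instance

-- ===== CLAIM (what is proved, stated in full; the proofs are below) =====
def Claim_equal_strip_libc_function_py : Prop := ∀ (libc_text : String) (name : String), Dom_strip_libc_function_py libc_text name → Spec_strip_libc_function_py libc_text name (strip_libc_function_py libc_text name)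

-- ===== LEMMAS AND PROOFS =====

-- While A is skipping, it drops lines up to the next top-level label, keeps that
-- label line and resumes in non-skip state: exactly B's skipToLabel.
theorem stripA_true_eq (target pre : String) (L : List String) :
    stripA_loop target pre true L =
      (match skipToLabel L with
       | [] => []
       | lab :: rest' => lab :: stripA_loop target pre false rest') := by
  induction L with
  | nil => rfl
  | cons l rest ih =>
    have e : (PySem.Str.startswith (PySem.Str.strip l) "_" && PySem.Str.isIn ":" (PySem.Str.strip l) && !PySem.Str.startswith (PySem.Str.strip l) ".") = isLabelB (PySem.Str.strip l) := rfl
    cases hb : isLabelB (PySem.Str.strip l) with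
    | true =>
      simp only [stripA_loop, skipToLabel, e, hb]
      simp
    | false =>
      simp only [stripA_loop, skipToLabel, e, hb]
      simpa using ih

theorem stripA_false_eq (target pre : String) :
    ∀ (n : Nat) (L : List String), L.length ≤ n →
      stripA_loop target pre false L = stripB_loop target pre L := by
  intro n
  induction n with
  | zero =>
    intro L hL
    have : L = [] := List.eq_nil_of_length_eq_zero (Nat.le_zero.mp hL)
    subst this
    simp [stripA_loop, stripB_loop]
  | succ n ih =>
    intro L hL
    match L with
    | [] => simp [stripA_loop, stripB_loop]
    | l :: rest =>
      simp only [List.length_cons, Nat.succ_le_succ_iff] at hL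
      have hbne : (PySem.Str.strip l != target && !PySem.Str.startswith (PySem.Str.strip l) pre)
          = !(PySem.Str.strip l == target || PySem.Str.startswith (PySem.Str.strip l) pre) := by
        simp [bne]
      cases ht : (PySem.Str.strip l == target || PySem.Str.startswith (PySem.Str.strip l) pre) with
      | true =>
        have hA : stripA_loop target pre false (l :: rest) = stripA_loop target pre true rest := by
          simp only [stripA_loop, ht]
          simp
        rw [hA, stripA_true_eq, stripB_loop]
        rw [hbne, ht]
        simp only [Bool.not_true, Bool.false_eq_true, if_false]
        cases h : skipToLabel rest with
        | nil => rfl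
        | cons lab rest' =>
          have hlen := skipToLabel_length_le rest
          rw [h] at hlen
          simp only [List.length_cons] at hlen
          exact congrArg (lab :: ·) (ih rest' (by omega))
      | false =>
        rw [stripB_loop, hbne, ht]
        simp only [Bool.not_false, if_true]
        simp only [stripA_loop, ht]
        simpa using ih rest hL

-- ===== VERDICT (by name: the statement is the Claim_ definition above) =====
theorem strip_libc_function_py_spec : Claim_equal_strip_libc_function_py := by
  intro libc_text name _
  unfold Spec_strip_libc_function_py strip_libc_function_py strip_libc_function_py_alt
  rw [stripA_false_eq _ _ (PySem.Str.splitlines libc_text).length _ (le_refl _)]
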